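-- pv_equiv track=rewrite | github.com/RajkumarYadav777/DSAlgo | STRINGS/SLIDING/substr_high_freq_char.py | high_freq_char
-- ===== SOURCE A (Python) =====
-- def high_freq_char(s, c, k):
--     if k > len(s):
--         return ''
--
--     count = sum(1 for ch in s[:k] if ch == c)
--     start = 0
--     max_count = count
--     for i in range(k, len(s)):
--         if s[i-k] ==c :
--             count -= 1
--
--         if s[i] == c:
--             count += 1
--
--         if count > max_count:
--             max_count = count
--             start = i-k+1
--     return max_count, s[start:start+k]
-- ===== SOURCE B (Python) =====
-- def high_freq_char(s, c, k):
--     if k > len(s):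
--         return ''
--     pre = [0]
--     for ch in s:
--         pre.append(pre[-1] + (1 if ch == c else 0))
--     max_count = pre[k]
--     start = 0
--     for i in range(1, len(s) - k + 1):
--         cnt = pre[i + k] - pre[i]
--         if cnt > max_count:
--             max_count = cnt
--             start = i
--     return max_count, s[start:start + k]
-- ===== Notes on version B (the rewrite author's own statement) =====
-- stated objective: alternative
-- what changed: Replaces the incremental sliding-window counter (decrement on the char leaving, increment on the char entering) by a prefix-sum array built in one pass, each window's count then being a difference pre[i+k]-pre[i]; same strict-> leftmost tie-breaking.
-- outside the precondition, e.g. on high_freq_char('ab', 'a', 5): A returns '', B returns ''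
import Mathlib
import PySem

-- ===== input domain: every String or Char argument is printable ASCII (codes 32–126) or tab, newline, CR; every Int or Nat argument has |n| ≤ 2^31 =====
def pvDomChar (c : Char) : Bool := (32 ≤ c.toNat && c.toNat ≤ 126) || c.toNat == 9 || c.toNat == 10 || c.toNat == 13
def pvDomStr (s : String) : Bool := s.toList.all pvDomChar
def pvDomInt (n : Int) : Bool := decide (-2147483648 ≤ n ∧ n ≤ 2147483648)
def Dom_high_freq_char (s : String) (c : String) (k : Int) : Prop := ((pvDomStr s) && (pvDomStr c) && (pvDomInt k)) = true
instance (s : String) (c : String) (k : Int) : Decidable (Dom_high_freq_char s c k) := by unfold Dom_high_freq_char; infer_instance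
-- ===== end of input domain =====

-- B replaces A's incremental sliding counter by a prefix-sum array (window count = pre[i+k]-pre[i]), a different decomposition of the same O(n) scan; A = B proved on 0 ≤ k ≤ len(s).

-- ===== PORT A =====
-- literal port of A's sliding-window loop; state = (count, start, max_count); 'ch == c' is 'c.toList == [ch]' (ch a 1-char string)
def high_freq_char (s : String) (c : String) (k : Int) : Int × String :=
  let l := s.toList
  if k > (l.length : Int) then (0, "")
  else
    let count : Int := ((PySem.List.slice l none (some k)).map
        (fun ch => if c.toList == [ch] then (1 : Int) else 0)).sum
    let r := (PySem.List.pyRange k (l.length : Int) 1).foldl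
      (fun (st : Int × Int × Int) i =>
        let c1 := if c.toList == [PySem.List.pyGetD l (i - k) ' '] then st.1 - 1 else st.1
        let c2 := if c.toList == [PySem.List.pyGetD l i ' '] then c1 + 1 else c1
        if c2 > st.2.2 then (c2, i - k + 1, c2) else (c2, st.2.1, st.2.2))
      (count, 0, count)
    (r.2.2, String.ofList (PySem.List.slice l (some r.2.1) (some (r.2.1 + k))))

-- ===== PORT B =====
-- literal port of Source B: prefix-sum list built by appending pre[-1] + match, then a scan over window starts; state = (max_count, start)
def high_freq_char_alt (s : String) (c : String) (k : Int) : Int × String :=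
  let l := s.toList
  if k > (l.length : Int) then (0, "")
  else
    let pre : List Int := l.foldl
      (fun acc ch => acc ++ [PySem.List.pyGetD acc (-1) 0 + (if c.toList == [ch] then 1 else 0)]) [0]
    let r := (PySem.List.pyRange 1 ((l.length : Int) - k + 1) 1).foldl
      (fun (st : Int × Int) i =>
        let cnt := PySem.List.pyGetD pre (i + k) 0 - PySem.List.pyGetD pre i 0
        if cnt > st.1 then (cnt, i) else st)
      (PySem.List.pyGetD pre k 0, 0)
    (r.1, String.ofList (PySem.List.slice l (some r.2) (some (r.2 + k))))

-- ===== PRECONDITION & SPEC =====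
-- Pre_ excludes k < 0 (A raises IndexError) and k > len(s) (A returns '', a bare str instead of an (int, str) pair).
def Pre_high_freq_char (s : String) (c : String) (k : Int) : Prop :=
  0 ≤ k ∧ k ≤ (s.toList.length : Int)
instance (s : String) (c : String) (k : Int) : Decidable (Pre_high_freq_char s c k) := by
  unfold Pre_high_freq_char; infer_instance
def pvWitness_high_freq_char : String × String × Int := ("abcab", "a", 2)

def Spec_high_freq_char (s : String) (c : String) (k : Int) (out : Int × String) : Prop := out = high_freq_char_alt s c k
instance (s : String) (c : String) (k : Int) (out : Int × String) : Decidable (Spec_high_freq_char s c k out) := by unfold Spec_high_freq_char; infer_instance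

-- ===== CLAIM (what is proved, stated in full; the proofs are below) =====
def Claim_equal_high_freq_char : Prop := ∀ (s : String) (c : String) (k : Int), Dom_high_freq_char s c k → Pre_high_freq_char s c k → Spec_high_freq_char s c k (high_freq_char s c k)

-- ===== LEMMAS AND PROOFS =====

-- count of matches of P in l[:t]
def pvPC (P : Char → Bool) (l : List Char) (t : Nat) : Int := ((l.take t).countP P : Int)

-- count of matches in the length-kn window starting at t
def pvW (P : Char → Bool) (l : List Char) (kn t : Nat) : Int := pvPC P l (kn + t) - pvPC P l t

-- leftmost strict argmax of the window counts over starts 0..m, as (max_count, start)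
def pvBest (P : Char → Bool) (l : List Char) (kn m : Nat) : Int × Int :=
  (List.range m).foldl
    (fun st j => if pvW P l kn (j + 1) > st.1 then (pvW P l kn (j + 1), (j : Int) + 1) else st)
    (pvW P l kn 0, 0)

-- range(a, b) as a mapped List.range
lemma pvRange_map (m : Nat) : ∀ a b : Int, (b - a).toNat = m →
    PySem.List.pyRange a b 1 = (List.range m).map (fun j : Nat => a + (j : Int)) := by
  induction m with
  | zero =>
    intro a b h
    simp [PySem.List.pyRange]
    omega
  | succ m ih =>
    intro a b h
    have hab : a < b := by omega
    rw [PySem.List.pyRange_one_cons hab, ih (a+1) b (by omega), List.range_succ_eq_map]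
    simp only [List.map_cons, List.map_map, Nat.cast_zero, add_zero]
    refine List.cons_eq_cons.mpr ⟨rfl, List.map_congr_left ?_⟩
    intro j _
    simp only [Function.comp_apply, Nat.cast_succ]
    ring

lemma pvPC_succ (P : Char → Bool) (l : List Char) (t : Nat) (ht : t < l.length) :
    ((l.take (t+1)).countP P : Int) = ((l.take t).countP P : Int) + (if P l[t] then 1 else 0) := by
  rw [List.take_add_one]
  simp only [List.getElem?_eq_getElem ht, Option.toList_some, List.countP_append, List.countP_cons, List.countP_nil]
  split_ifs with h <;> simp

lemma pvW_zero (P : Char → Bool) (l : List Char) (kn : Nat) : pvW P l kn 0 = pvPC P l kn := by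
  simp [pvW, pvPC]

-- sliding step: the window count at t+1 from the one at t
lemma pvW_succ (P : Char → Bool) (l : List Char) (kn t : Nat) (ht : kn + t < l.length) :
    pvW P l kn (t + 1) = (pvW P l kn t - (if P l[t] then 1 else 0)) + (if P l[kn + t] then 1 else 0) := by
  unfold pvW
  have h1 := pvPC_succ P l (kn + t) ht
  have h2 := pvPC_succ P l t (by omega)
  unfold pvPC at *
  rw [show kn + (t+1) = (kn + t) + 1 by ring, h1, h2]
  ring

-- B's prefix list is the table of prefix counts
lemma pvPre_spec (P : Char → Bool) (l : List Char) :
    l.foldl (fun acc ch => acc ++ [PySem.List.pyGetD acc (-1) 0 + (if P ch then 1 else 0)]) [0]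
      = (List.range (l.length + 1)).map (fun t => pvPC P l t) := by
  induction l using List.reverseRecOn with
  | nil => simp [pvPC]
  | append_singleton l a ih =>
    rw [List.foldl_append, ih]
    have hsp : (List.range (l.length + 1)).map (fun t => pvPC P l t)
        = (List.range l.length).map (fun t => pvPC P l t) ++ [pvPC P l l.length] := by
      rw [List.range_succ, List.map_append]; simp
    simp only [List.foldl_cons, List.foldl_nil, hsp, PySem.List.pyGetD_neg_one_append_singleton]
    rw [List.length_append, List.length_singleton, List.range_succ, List.range_succ, List.map_append, List.map_append]
    simp only [List.map_cons, List.map_nil]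
    congr 1
    · congr 1
      · apply List.map_congr_left
        intro t ht
        simp only [List.mem_range] at ht
        unfold pvPC
        rw [List.take_append_of_le_length (by omega)]
      · unfold pvPC
        rw [List.take_append_of_le_length (by omega)]
    · unfold pvPC
      have h2 : List.take (l.length + 1) (l ++ [a]) = l ++ [a] := List.take_of_length_le (by simp)
      rw [h2]
      simp [List.countP_append, List.countP_cons]

lemma pvPre_get (P : Char → Bool) (l : List Char) (i : Int) (h0 : 0 ≤ i) (h1 : i ≤ (l.length : Int)) :
    PySem.List.pyGetD ((List.range (l.length + 1)).map (fun t => pvPC P l t)) i 0 = pvPC P l i.toNat := by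
  rw [PySem.List.pyGetD_eq_getElem _ 0 h0 (by simp; omega)]
  simp only [List.getElem_map, List.getElem_range]

-- invariant of A's loop: after m steps the state is (current window count, leftmost argmax so far)
lemma pvA_loop (P : Char → Bool) (l : List Char) (kn : Nat) (hkn : kn ≤ l.length)
    (m : Nat) (hm : m ≤ l.length - kn) :
    ((List.range m).map (fun j : Nat => (kn : Int) + (j : Int))).foldl
      (fun (st : Int × Int × Int) i =>
        let c1 := if P (PySem.List.pyGetD l (i - (kn : Int)) ' ') then st.1 - 1 else st.1
        let c2 := if P (PySem.List.pyGetD l i ' ') then c1 + 1 else c1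
        if c2 > st.2.2 then (c2, i - (kn : Int) + 1, c2) else (c2, st.2.1, st.2.2))
      (pvW P l kn 0, 0, pvW P l kn 0)
    = (pvW P l kn m, (pvBest P l kn m).2, (pvBest P l kn m).1) := by
  induction m with
  | zero => simp [pvBest]
  | succ m ih =>
    rw [List.range_succ, List.map_append, List.foldl_append, ih (by omega)]
    have hg1 : PySem.List.pyGetD l ((kn : Int) + (m : Int) - (kn : Int)) ' ' = l[m]'(by omega) := by
      rw [show (kn : Int) + (m : Int) - (kn : Int) = ((m : Nat) : Int) by ring]
      rw [PySem.List.pyGetD_eq_getElem l ' ' (Int.natCast_nonneg m) (by simp; omega)]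
      simp
    have hg2 : PySem.List.pyGetD l ((kn : Int) + (m : Int)) ' ' = l[kn + m]'(by omega) := by
      rw [show (kn : Int) + (m : Int) = ((kn + m : Nat) : Int) by push_cast; ring]
      rw [PySem.List.pyGetD_eq_getElem l ' ' (Int.natCast_nonneg _) (by simp; omega)]
      congr 1
    simp only [List.map_cons, List.map_nil, List.foldl_cons, List.foldl_nil, hg1, hg2]
    have hw := pvW_succ P l kn m (by omega)
    have hc2 : ((if P (l[kn+m]'(by omega)) then
        ((if P (l[m]'(by omega)) then pvW P l kn m - 1 else pvW P l kn m)) + 1 else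
        ((if P (l[m]'(by omega)) then pvW P l kn m - 1 else pvW P l kn m)))) = pvW P l kn (m + 1) := by
      rw [hw]; split_ifs <;> ring
    have hb : pvBest P l kn (m + 1) =
        (if pvW P l kn (m + 1) > (pvBest P l kn m).1 then (pvW P l kn (m + 1), (m : Int) + 1)
         else pvBest P l kn m) := by
      unfold pvBest
      rw [List.range_succ, List.foldl_append, List.foldl_cons, List.foldl_nil]
    simp only [hc2]
    rw [hb]
    split_ifs with h
    · simp only [Prod.mk.injEq]
      exact ⟨trivial, by ring, trivial⟩
    · rfl

-- A's result in terms of pvBest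
lemma pvA_eval (s c : String) (k : Int) (h0 : 0 ≤ k) (h1 : k ≤ (s.toList.length : Int)) :
    high_freq_char s c k =
      ((pvBest (fun ch => c.toList == [ch]) s.toList k.toNat (s.toList.length - k.toNat)).1,
       String.ofList (PySem.List.slice s.toList
         (some (pvBest (fun ch => c.toList == [ch]) s.toList k.toNat (s.toList.length - k.toNat)).2)
         (some ((pvBest (fun ch => c.toList == [ch]) s.toList k.toNat (s.toList.length - k.toNat)).2 + k)))) := by
  obtain ⟨kn, rfl⟩ := Int.eq_ofNat_of_zero_le h0
  simp only [Int.toNat_natCast]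
  have hknl : kn ≤ s.toList.length := by omega
  unfold high_freq_char
  rw [if_neg (not_lt.mpr h1)]
  have hcount : ((PySem.List.slice s.toList none (some ((kn : Nat) : Int))).map
      (fun ch => if c.toList == [ch] then (1 : Int) else 0)).sum
        = pvW (fun ch => c.toList == [ch]) s.toList kn 0 := by
    rw [PySem.List.slice_to s.toList h0,
        PySem.List.sum_map_ite_one_zero (fun ch => c.toList == [ch]), pvW_zero]
    simp [pvPC]
  have hrange : PySem.List.pyRange ((kn : Nat) : Int) (s.toList.length : Int) 1
      = (List.range (s.toList.length - kn)).map (fun j : Nat => ((kn : Nat) : Int) + (j : Int)) := by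
    exact pvRange_map (s.toList.length - kn) _ _ (by omega)
  simp only [hcount, hrange]
  rw [pvA_loop (fun ch => c.toList == [ch]) s.toList kn hknl (s.toList.length - kn) (le_refl _)]

-- B's result in terms of pvBest
lemma pvB_eval (s c : String) (k : Int) (h0 : 0 ≤ k) (h1 : k ≤ (s.toList.length : Int)) :
    high_freq_char_alt s c k =
      ((pvBest (fun ch => c.toList == [ch]) s.toList k.toNat (s.toList.length - k.toNat)).1,
       String.ofList (PySem.List.slice s.toList
         (some (pvBest (fun ch => c.toList == [ch]) s.toList k.toNat (s.toList.length - k.toNat)).2)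
         (some ((pvBest (fun ch => c.toList == [ch]) s.toList k.toNat (s.toList.length - k.toNat)).2 + k)))) := by
  obtain ⟨kn, rfl⟩ := Int.eq_ofNat_of_zero_le h0
  simp only [Int.toNat_natCast]
  have hknl : kn ≤ s.toList.length := by omega
  unfold high_freq_char_alt
  rw [if_neg (not_lt.mpr h1)]
  have hpre := pvPre_spec (fun ch => c.toList == [ch]) s.toList
  simp only [hpre]
  have hinit : PySem.List.pyGetD
      ((List.range (s.toList.length + 1)).map (fun t => pvPC (fun ch => c.toList == [ch]) s.toList t))
      ((kn : Nat) : Int) 0 = pvW (fun ch => c.toList == [ch]) s.toList kn 0 := by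
    rw [pvPre_get _ _ _ (by positivity) (by omega), pvW_zero]
    simp
  have hrange : PySem.List.pyRange 1 ((s.toList.length : Int) - ((kn : Nat) : Int) + 1) 1
      = (List.range (s.toList.length - kn)).map (fun j : Nat => (1 : Int) + (j : Int)) := by
    exact pvRange_map (s.toList.length - kn) _ _ (by omega)
  simp only [hinit, hrange, List.foldl_map]
  rw [PySem.List.foldl_congr_mem (List.range (s.toList.length - kn)) _
      (fun st j => if pvW (fun ch => c.toList == [ch]) s.toList kn (j + 1) > st.1
        then (pvW (fun ch => c.toList == [ch]) s.toList kn (j + 1), (j : Int) + 1) else st)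
      _ ?_]
  · rfl
  · intro acc j hj
    simp only [List.mem_range] at hj
    have hg1 : PySem.List.pyGetD
        ((List.range (s.toList.length + 1)).map (fun t => pvPC (fun ch => c.toList == [ch]) s.toList t))
        ((1 : Int) + (j : Int) + ((kn : Nat) : Int)) 0
          = pvPC (fun ch => c.toList == [ch]) s.toList (kn + (j + 1)) := by
      rw [pvPre_get _ _ _ (by positivity) (by omega)]
      congr 1
      omega
    have hg2 : PySem.List.pyGetD
        ((List.range (s.toList.length + 1)).map (fun t => pvPC (fun ch => c.toList == [ch]) s.toList t))
        ((1 : Int) + (j : Int)) 0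
          = pvPC (fun ch => c.toList == [ch]) s.toList (j + 1) := by
      rw [pvPre_get _ _ _ (by positivity) (by omega)]
      congr 1
      omega
    simp only [hg1, hg2]
    have hw : pvPC (fun ch => c.toList == [ch]) s.toList (kn + (j + 1))
        - pvPC (fun ch => c.toList == [ch]) s.toList (j + 1)
        = pvW (fun ch => c.toList == [ch]) s.toList kn (j + 1) := rfl
    rw [hw]
    split_ifs with h
    · simp only [Prod.mk.injEq]
      exact ⟨trivial, by ring⟩
    · rfl

-- ===== VERDICT (by name: the statement is the Claim_ definition above) =====
theorem high_freq_char_spec : Claim_equal_high_freq_char := by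
  intro s c k _ hpre
  unfold Spec_high_freq_char
  rw [pvA_eval s c k hpre.1 hpre.2, pvB_eval s c k hpre.1 hpre.2]
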